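-- pv_equiv track=rewrite | github.com/asd1054/luogu_python | 新手村/03循环！循环！循环！/P1008 三连击.py | isAllSame
-- ===== SOURCE A (Python) =====
-- def isAllSame(a,b,c):
--     num = []
--     aim = [a,b,c]
--     for i in aim:
--         tmp = i//100
--         num.append(tmp)
--         tmp = i//10 % 10
--         num.append(tmp)
--         tmp = i % 10
--         num.append(tmp)
--     # 列表去重
--     num = list(set(num))
--     if len(num) <9:
--         return False
--     else :
--         return True
-- ===== SOURCE B (Python) =====
-- def _distinctSorted(xs):
--     # xs is sorted: distinct iff no two neighbours are equal
--     if len(xs) < 2: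
--         return True
--     if xs[0] == xs[1]:
--         return False
--     return _distinctSorted(xs[1:])
--
-- def isAllSame(a, b, c):
--     digits = sorted(d for i in (a, b, c) for d in (i // 100, i // 10 % 10, i % 10))
--     return _distinctSorted(digits)
-- ===== Notes on version B (the rewrite author's own statement) =====
-- stated objective: alternative
-- what changed: Replaces the set-deduplication-and-length test with sorting the 9 extracted digits and a linear scan of adjacent pairs for a duplicate.
import Mathlib
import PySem

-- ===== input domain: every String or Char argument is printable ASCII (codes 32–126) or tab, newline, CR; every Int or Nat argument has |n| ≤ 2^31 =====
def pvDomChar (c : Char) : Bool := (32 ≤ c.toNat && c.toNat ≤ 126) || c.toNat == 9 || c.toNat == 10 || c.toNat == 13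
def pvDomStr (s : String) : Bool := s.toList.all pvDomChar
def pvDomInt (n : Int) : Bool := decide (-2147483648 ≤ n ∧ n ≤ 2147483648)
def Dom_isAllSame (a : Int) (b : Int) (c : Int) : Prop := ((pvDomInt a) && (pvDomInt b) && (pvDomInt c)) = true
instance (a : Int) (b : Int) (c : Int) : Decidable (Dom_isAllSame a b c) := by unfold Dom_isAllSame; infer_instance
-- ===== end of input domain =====

-- B replaces A's set-deduplication length test with sort-then-adjacent-scan for duplicates (alternative decomposition, same cost).

-- ===== PORT A =====
def isAllSame (a : Int) (b : Int) (c : Int) : Bool :=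
  let num : List Int :=
    ([a, b, c]).foldl (fun num i =>
      ((num ++ [PySem.Int.floordiv i 100])
        ++ [PySem.Int.mod (PySem.Int.floordiv i 10) 10])
        ++ [PySem.Int.mod i 10]) []
  let num := PySem.Set.ofList num          -- list(set(num)); only its length is used
  if num.length < 9 then false else true

-- ===== PORT B =====
def distinctSorted : List Int → Bool
  | x :: y :: t => if x == y then false else distinctSorted (y :: t)
  | _ => true

def isAllSame_alt (a : Int) (b : Int) (c : Int) : Bool :=
  let digits := PySem.List.sorted
    (([a, b, c]).flatMap (fun i =>
      [PySem.Int.floordiv i 100, PySem.Int.mod (PySem.Int.floordiv i 10) 10, PySem.Int.mod i 10]))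
    (fun x => x) false
  distinctSorted digits

-- ===== PRECONDITION & SPEC =====
def Spec_isAllSame (a : Int) (b : Int) (c : Int) (out : Bool) : Prop := out = isAllSame_alt a b c
instance (a : Int) (b : Int) (c : Int) (out : Bool) : Decidable (Spec_isAllSame a b c out) := by unfold Spec_isAllSame; infer_instance

-- ===== CLAIM (what is proved, stated in full; the proofs are below) =====
def Claim_equal_isAllSame : Prop := ∀ (a : Int) (b : Int) (c : Int), Dom_isAllSame a b c → Spec_isAllSame a b c (isAllSame a b c)

-- ===== LEMMAS AND PROOFS =====

-- set(xs) keeps xs's length exactly when xs has no duplicates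
theorem len_ofList_eq_iff (xs : List Int) :
    (PySem.Set.ofList xs).length = xs.length ↔ xs.Nodup := by
  induction xs with
  | nil => simp [PySem.Set.ofList_nil]
  | cons x xs ih =>
    rw [PySem.Set.ofList_cons]
    by_cases hx : x ∈ xs
    · have hmem : x ∈ PySem.Set.ofList xs := (PySem.Set.mem_ofList xs x).mpr hx
      have hlt : (PySem.Set.discard (PySem.Set.ofList xs) x).length < (PySem.Set.ofList xs).length := by
        simp only [PySem.Set.discard]
        exact List.length_filter_lt_length_iff_exists.mpr ⟨x, hmem, by simp⟩
      have hle := PySem.Set.length_ofList_le xs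
      constructor
      · intro h
        exfalso
        simp only [List.length_cons] at h
        omega
      · intro h
        exact absurd hx (List.nodup_cons.mp h).1
    · have hdis : PySem.Set.discard (PySem.Set.ofList xs) x = PySem.Set.ofList xs := by
        simp only [PySem.Set.discard]
        apply List.filter_eq_self.mpr
        intro y hy
        have hyx : y ∈ xs := (PySem.Set.mem_ofList xs y).mp hy
        by_cases he : y = x
        · exact absurd (he ▸ hyx) hx
        · simp [he]
      rw [hdis]
      simp [ih, hx]

-- on a ≤-sorted list, the adjacent scan decides Nodup
theorem distinctSorted_iff (l : List Int) (h : l.Pairwise (· ≤ ·)) :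
    distinctSorted l = true ↔ l.Nodup := by
  induction l with
  | nil => simp [distinctSorted]
  | cons x t ih =>
    cases t with
    | nil => simp [distinctSorted]
    | cons y t' =>
      have hx := (List.pairwise_cons.mp h).1
      have hp := (List.pairwise_cons.mp h).2
      have hxy : x ≤ y := hx y (by simp)
      have hyz := (List.pairwise_cons.mp hp).1
      by_cases he : x = y
      · subst he
        simp [distinctSorted, List.nodup_cons]
      · have hnm : x ∉ y :: t' := by
          intro hm
          rcases List.mem_cons.mp hm with h1 | h1
          · exact he h1
          · exact he (le_antisymm hxy (hyz x h1))
        simp only [distinctSorted, beq_iff_eq, if_neg he]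
        rw [ih hp]
        simp [List.nodup_cons, hnm]

theorem main_lemma (xs : List Int) (h9 : xs.length = 9) :
    (if (PySem.Set.ofList xs).length < 9 then false else true)
      = distinctSorted (PySem.List.sorted xs (fun x => x) false) := by
  have hperm : (PySem.List.sorted xs (fun x => x) false).Perm xs := PySem.List.sorted_perm xs _ false
  have hp : (PySem.List.sorted xs (fun x => x) false).Pairwise (· ≤ ·) :=
    PySem.List.sorted_pairwise xs (fun x => x)
  have h1 : distinctSorted (PySem.List.sorted xs (fun x => x) false) = true ↔ xs.Nodup :=
    (distinctSorted_iff _ hp).trans hperm.nodup_iff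
  have h2 := len_ofList_eq_iff xs
  have hle := PySem.Set.length_ofList_le xs
  by_cases hn : xs.Nodup
  · rw [if_neg (by rw [h2.mpr hn, h9]; omega), (h1.mpr hn)]
  · have hlt : (PySem.Set.ofList xs).length < 9 := by
      rcases lt_or_eq_of_le hle with h | h
      · omega
      · exact absurd (h2.mp h) hn
    rw [if_pos hlt]
    rcases Bool.eq_false_or_eq_true (distinctSorted (PySem.List.sorted xs (fun x => x) false)) with h | h
    · exact absurd (h1.mp h) hn
    · exact h.symm

-- ===== VERDICT (by name: the statement is the Claim_ definition above) =====
theorem isAllSame_spec : Claim_equal_isAllSame := by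
  intro a b c _
  unfold Spec_isAllSame isAllSame isAllSame_alt
  simp only [List.foldl, List.flatMap, List.map, List.flatten, List.nil_append,
    List.cons_append]
  exact main_lemma _ rfl
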